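-- pv_equiv track=rewrite | github.com/EVS-GIS/python-fct | fct/drainage/Burn.py | find_head_lines
-- ===== SOURCE A (Python) =====
-- def find_head_lines(lines):
--     head_idx = []
--
--     num_lines = len(lines)
--     for i in range(num_lines):
--         line = lines[i]
--         first_point = line[0]
--
--         has_upstream = False
--
--         for j in range(num_lines):
--             if j == i:
--                 continue
--             line = lines[j]
--             last_point = line[len(line)-1]
--
--             if first_point == last_point:
--                 has_upstream = True
--
--         if not has_upstream:
--             head_idx.append(i)
--
--     return head_idx
-- ===== SOURCE B (Python) =====
-- def find_head_lines(lines):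
--     last_counts = {}
--     for line in lines:
--         p = line[-1]
--         last_counts[p] = last_counts.get(p, 0) + 1
--
--     head_idx = []
--     for i, line in enumerate(lines):
--         first_point = line[0]
--         c = last_counts.get(first_point, 0)
--         if line[-1] == first_point:
--             c -= 1
--         if c == 0:
--             head_idx.append(i)
--     return head_idx
-- ===== Notes on version B (the rewrite author's own statement) =====
-- stated objective: faster
-- what changed: A rescans all lines' last points for every line (nested loops); B builds a dict counting last points in one pass and decides each line by a single lookup, subtracting 1 for a self-loop to preserve the i != j exclusion.
-- outside the precondition, e.g. on find_head_lines([[], [(0, 0)]]): A raises IndexError, B raises IndexError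
import Mathlib
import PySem

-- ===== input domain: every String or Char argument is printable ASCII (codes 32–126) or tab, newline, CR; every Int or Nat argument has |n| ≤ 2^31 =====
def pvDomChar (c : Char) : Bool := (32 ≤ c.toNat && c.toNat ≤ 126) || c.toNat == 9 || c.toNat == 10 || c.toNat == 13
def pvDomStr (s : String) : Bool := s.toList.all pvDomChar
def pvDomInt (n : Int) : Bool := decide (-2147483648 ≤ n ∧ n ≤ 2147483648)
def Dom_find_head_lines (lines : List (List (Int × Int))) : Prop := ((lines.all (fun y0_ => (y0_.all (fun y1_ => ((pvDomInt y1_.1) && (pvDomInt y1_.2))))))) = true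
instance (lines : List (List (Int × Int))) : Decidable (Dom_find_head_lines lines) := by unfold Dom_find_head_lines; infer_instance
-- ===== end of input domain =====

-- B replaces A's per-line backward scan over all lines by a dict of last-point counts built in one pass (objective: faster).

-- ===== PORT A =====
def find_head_lines (lines : List (List (Int × Int))) : List Int :=
  let num_lines : Int := lines.length
  (PySem.List.pyRange 0 num_lines 1).foldl (fun head_idx i =>
    let line := PySem.List.pyGetD lines i []
    let first_point := PySem.List.pyGetD line 0 ((0:Int), (0:Int))
    let has_upstream := (PySem.List.pyRange 0 num_lines 1).foldl (fun h j =>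
      if j = i then h
      else
        let line2 := PySem.List.pyGetD lines j []
        let last_point := PySem.List.pyGetD line2 ((line2.length : Int) - 1) ((0:Int), (0:Int))
        if first_point = last_point then true else h) false
    if has_upstream = false then head_idx ++ [i] else head_idx) []

-- ===== PORT B =====
def find_head_lines_alt (lines : List (List (Int × Int))) : List Int :=
  let last_counts : PySem.Dict (Int × Int) Int := lines.foldl (fun d line =>
    let p := PySem.List.pyGetD line (-1) ((0:Int), (0:Int))
    d.insert p (d.getD p 0 + 1)) PySem.Dict.empty
  (PySem.List.enumerate lines).foldl (fun head_idx pr =>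
    let first_point := PySem.List.pyGetD pr.2 0 ((0:Int), (0:Int))
    let c := last_counts.getD first_point 0
    let c := if PySem.List.pyGetD pr.2 (-1) ((0:Int), (0:Int)) = first_point then c - 1 else c
    if c = 0 then head_idx ++ [pr.1] else head_idx) []

-- ===== PRECONDITION & SPEC =====
-- Pre_ excludes inputs containing an empty polyline, on which A raises IndexError at line[0] (B raises there too, at line[-1]).
def Pre_find_head_lines (lines : List (List (Int × Int))) : Prop := ∀ l ∈ lines, l ≠ []
instance (lines : List (List (Int × Int))) : Decidable (Pre_find_head_lines lines) := by unfold Pre_find_head_lines; infer_instance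
def pvWitness_find_head_lines : (List (List (Int × Int))) := [[(0, 0), (1, 1)], [(1, 1), (2, 2)]]

def Spec_find_head_lines (lines : List (List (Int × Int))) (out : List Int) : Prop := out = find_head_lines_alt lines
instance (lines : List (List (Int × Int))) (out : List Int) : Decidable (Spec_find_head_lines lines out) := by unfold Spec_find_head_lines; infer_instance

-- ===== CLAIM (what is proved, stated in full; the proofs are below) =====
def Claim_equal_find_head_lines : Prop := ∀ (lines : List (List (Int × Int))), Dom_find_head_lines lines → Pre_find_head_lines lines → Spec_find_head_lines lines (find_head_lines lines)

-- ===== LEMMAS AND PROOFS =====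

lemma last_bridge (l : List (Int × Int)) (h : l ≠ []) (d : Int × Int) :
    PySem.List.pyGetD l ((l.length : Int) - 1) d = PySem.List.pyGetD l (-1) d := by
  have hl : 0 < l.length := List.length_pos_iff.mpr h
  rw [PySem.List.pyGetD_neg_ofNat l 1 d (by omega) (by omega),
      PySem.List.pyGetD_eq_getElem l d (by omega) (by omega)]
  congr 1
  omega

lemma inner_any (P Q : Nat → Prop) [DecidablePred P] [DecidablePred Q] (l : List Nat) (b : Bool) :
    l.foldl (fun h j => if Q j then h else if P j then true else h) b
      = (b || l.any (fun j => !decide (Q j) && decide (P j))) := by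
  have he : (fun (h : Bool) (j : Nat) => if Q j then h else if P j then true else h)
       = (fun h j => if (!decide (Q j) && decide (P j)) then true else h) := by
    funext h j; by_cases hq : Q j <;> by_cases hp : P j <;> simp [hq, hp]
  rw [he, PySem.List.foldl_if_true_eq]

lemma count_erase_char {α : Type} [DecidableEq α] (r : List α) (hnd : r.Nodup) (k : α) (hk : k ∈ r)
    (p : α → Bool) :
    (r.any (fun j => !(j == k) && p j) = false) ↔ (r.countP p = if p k then 1 else 0) := by
  have hperm := List.perm_cons_erase hk
  have hcount : r.countP p = (if p k then 1 else 0) + (r.erase k).countP p := by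
    rw [hperm.countP_eq]; simp [List.countP_cons]; by_cases h : p k <;> simp [h]; omega
  rw [hcount]
  constructor
  · intro hany
    have hz : (r.erase k).countP p = 0 := by
      rw [List.countP_eq_zero]
      intro a ha
      have hm := (List.Nodup.mem_erase_iff hnd).mp ha
      simp [List.any_eq_false] at hany
      intro hpa
      exact absurd hpa (by simpa [hm.1] using hany a hm.2)
    omega
  · intro hc
    have hz : (r.erase k).countP p = 0 := by omega
    rw [List.countP_eq_zero] at hz
    simp [List.any_eq_false]
    intro a ha hne
    simpa using hz a ((List.Nodup.mem_erase_iff hnd).mpr ⟨hne, ha⟩)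

lemma getD_range_map (l : List (List (Int × Int))) :
    (List.range l.length).map (fun j => l[j]?.getD []) = l := by
  apply List.ext_getElem <;> simp
  intro i h1 h2
  simp [List.getElem?_eq_getElem h1]

lemma dict_count (lines : List (List (Int × Int))) (v : Int × Int) :
    (lines.foldl (fun d line =>
        d.insert (PySem.List.pyGetD line (-1) ((0:Int), (0:Int)))
          (d.getD (PySem.List.pyGetD line (-1) ((0:Int), (0:Int))) 0 + 1)) PySem.Dict.empty).getD v 0
      = ((lines.map (fun line => PySem.List.pyGetD line (-1) ((0:Int), (0:Int)))).count v : Int) := by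
  rw [← List.foldl_map (f := fun line => PySem.List.pyGetD line (-1) ((0:Int), (0:Int)))
      (g := fun (d : PySem.Dict (Int × Int) Int) p => d.insert p (d.getD p 0 + 1))]
  rw [PySem.Dict.getD_foldl_insert_add_one, PySem.Dict.getD_empty, zero_add]


theorem main (lines : List (List (Int × Int))) (hpre : Pre_find_head_lines lines) :
    find_head_lines lines = find_head_lines_alt lines := by
  simp only [find_head_lines, find_head_lines_alt,
    PySem.List.enumerate_eq_map_pyRange _ [], PySem.List.len_eq,
    PySem.List.pyRange_zero_natCast, List.foldl_map, PySem.List.pyGetD_natCast, dict_count]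
  apply PySem.List.foldl_congr_mem
  intro acc k hkr
  have hk : k < lines.length := by simpa using hkr
  have hmem : ∀ j, j < lines.length → lines.getD j [] ∈ lines := by
    intro j hj; rw [List.getD_eq_getElem _ _ hj]; exact List.getElem_mem hj
  rw [inner_any (fun j => PySem.List.pyGetD (lines.getD k []) 0 ((0:Int),(0:Int))
        = PySem.List.pyGetD (lines.getD j []) ((↑(lines.getD j []).length : Int) - 1) ((0:Int),(0:Int)))
      (fun j => (↑j : Int) = (↑k : Int))]
  rw [Bool.false_or]
  set fp := PySem.List.pyGetD (lines.getD k []) 0 ((0:Int),(0:Int)) with hfp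
  set lastNeg := fun l => PySem.List.pyGetD l (-1) ((0:Int),(0:Int)) with hlast
  -- normalise A's any-predicate
  have hany : ((List.range lines.length).any (fun j => !decide ((↑j:Int) = (↑k:Int))
        && decide (fp = PySem.List.pyGetD (lines.getD j []) ((↑(lines.getD j []).length : Int) - 1) ((0:Int),(0:Int)))))
      = ((List.range lines.length).any (fun j => !(j == k) && decide (fp = lastNeg (lines.getD j [])))) := by
    apply PySem.List.any_congr_mem
    intro j hj
    rw [List.mem_range] at hj
    rw [last_bridge _ (hpre _ (hmem j hj))]
    by_cases h : j = k <;> simp [h, hlast]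
  rw [hany]
  -- B's count over the mapped lasts, as countP over indices
  have hcnt : (lines.map lastNeg).count fp
      = (List.range lines.length).countP (fun j => decide (fp = lastNeg (lines.getD j []))) := by
    conv_lhs => rw [← getD_range_map lines]
    rw [List.map_map, List.count_eq_countP, List.countP_map]
    apply List.countP_congr
    intro j _
    simp only [Function.comp_apply, beq_iff_eq, decide_eq_true_eq, List.getD_eq_getElem?_getD]
    exact eq_comm
  -- condition equivalence
  have hiff : ((List.range lines.length).any (fun j => !(j == k) && decide (fp = lastNeg (lines.getD j [])))) = false
      ↔ ((if lastNeg (lines.getD k []) = fp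
            then ((lines.map lastNeg).count fp : Int) - 1
            else ((lines.map lastNeg).count fp : Int)) = 0) := by
    rw [count_erase_char (List.range lines.length) (List.nodup_range) k (List.mem_range.mpr hk)]
    rw [hcnt]
    simp only [decide_eq_true_eq]
    by_cases h : fp = lastNeg (lines.getD k [])
    · rw [if_pos h, if_pos h.symm]
      omega
    · rw [if_neg h, if_neg (fun e => h e.symm)]
      omega
  rw [if_congr hiff rfl rfl]

-- ===== VERDICT (by name: the statement is the Claim_ definition above) =====
theorem find_head_lines_spec : Claim_equal_find_head_lines := by
  intro lines _ hpre
  exact main lines hpre
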